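-- pv_equiv track=rewrite | github.com/benwatson528/advent-of-code-23 | main/day22/sand_slabs.py | get_moved_bricks
-- ===== SOURCE A (Python) =====
-- def get_moved_bricks(start_bricks, end_bricks):
--     moved_bricks = 0
--     for brick_num in set(start_bricks.values()):
--         start_brick_coords = set(k for k, v in start_bricks.items() if v == brick_num)
--         end_brick_coords = set(k for k, v in end_bricks.items() if v == brick_num)
--         if start_brick_coords != end_brick_coords:
--             moved_bricks += 1
--     return moved_bricks
-- ===== SOURCE B (Python) =====
-- def get_moved_bricks(start_bricks, end_bricks):
--     start_groups = {}
--     for coords, brick_num in start_bricks.items():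
--         start_groups.setdefault(brick_num, set()).add(coords)
--     end_groups = {}
--     for coords, brick_num in end_bricks.items():
--         end_groups.setdefault(brick_num, set()).add(coords)
--     moved_bricks = 0
--     for brick_num, coords in start_groups.items():
--         if coords != end_groups.get(brick_num, set()):
--             moved_bricks += 1
--     return moved_bricks
-- ===== Notes on version B (the rewrite author's own statement) =====
-- stated objective: alternative
-- what changed: B groups coordinates by brick number once into a dict of sets for each input and compares per-brick groups, instead of A's per-brick-number rescans of both whole dicts; it avoids A's repeated full scans but was not measurably faster on the generated inputs.
import Mathlib
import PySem

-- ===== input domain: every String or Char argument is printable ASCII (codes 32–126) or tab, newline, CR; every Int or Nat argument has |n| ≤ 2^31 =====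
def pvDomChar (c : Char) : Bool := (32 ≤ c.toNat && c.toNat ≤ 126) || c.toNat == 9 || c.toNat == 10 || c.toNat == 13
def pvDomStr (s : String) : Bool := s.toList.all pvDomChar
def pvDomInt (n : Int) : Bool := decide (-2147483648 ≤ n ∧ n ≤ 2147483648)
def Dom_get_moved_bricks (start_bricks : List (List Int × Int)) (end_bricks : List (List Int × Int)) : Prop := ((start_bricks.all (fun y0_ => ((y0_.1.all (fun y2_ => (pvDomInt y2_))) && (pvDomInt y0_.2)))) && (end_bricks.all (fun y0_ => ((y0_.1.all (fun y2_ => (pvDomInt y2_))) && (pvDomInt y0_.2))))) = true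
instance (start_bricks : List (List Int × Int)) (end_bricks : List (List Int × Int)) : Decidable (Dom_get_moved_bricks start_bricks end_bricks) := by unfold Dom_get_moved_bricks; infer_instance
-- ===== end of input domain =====

-- B groups coordinates by brick number once per dict and compares per-brick groups, replacing A's per-brick rescans (objective: alternative single-pass grouping).

-- ===== PORT A =====
-- A: for each brick_num in set(start_bricks.values()), rescan both dicts' items for keys with that value and compare the two sets.
def get_moved_bricks (start_bricks : List (List Int × Int)) (end_bricks : List (List Int × Int)) : Int :=
  (PySem.Set.ofList (start_bricks.map (·.2))).foldl
    (fun moved_bricks brick_num =>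
      let start_brick_coords : PySem.Set (List Int) :=
        PySem.Set.ofList ((start_bricks.filter (fun kv => kv.2 == brick_num)).map (·.1))
      let end_brick_coords : PySem.Set (List Int) :=
        PySem.Set.ofList ((end_bricks.filter (fun kv => kv.2 == brick_num)).map (·.1))
      if PySem.Set.equal start_brick_coords end_brick_coords then moved_bricks
      else moved_bricks + 1) 0

-- ===== PORT B =====
-- B-side helper: one pass building brick_num -> set of coords (setdefault(...).add(...) = modify with empty default)
def pvGroups (bricks : List (List Int × Int)) : PySem.Dict Int (PySem.Set (List Int)) :=
  bricks.foldl
    (fun d kv => d.modify kv.2 PySem.Set.empty (fun s => PySem.Set.add s kv.1))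
    PySem.Dict.empty

def get_moved_bricks_alt (start_bricks : List (List Int × Int)) (end_bricks : List (List Int × Int)) : Int :=
  let start_groups := pvGroups start_bricks
  let end_groups := pvGroups end_bricks
  start_groups.items.foldl
    (fun moved_bricks kv =>
      if PySem.Set.equal kv.2 (end_groups.getD kv.1 PySem.Set.empty) then moved_bricks
      else moved_bricks + 1) 0

-- ===== PRECONDITION & SPEC =====
def Spec_get_moved_bricks (start_bricks : List (List Int × Int)) (end_bricks : List (List Int × Int)) (out : Int) : Prop := out = get_moved_bricks_alt start_bricks end_bricks
instance (start_bricks : List (List Int × Int)) (end_bricks : List (List Int × Int)) (out : Int) : Decidable (Spec_get_moved_bricks start_bricks end_bricks out) := by unfold Spec_get_moved_bricks; infer_instance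

-- ===== CLAIM (what is proved, stated in full; the proofs are below) =====
def Claim_equal_get_moved_bricks : Prop := ∀ (start_bricks : List (List Int × Int)) (end_bricks : List (List Int × Int)), Dom_get_moved_bricks start_bricks end_bricks → Spec_get_moved_bricks start_bricks end_bricks (get_moved_bricks start_bricks end_bricks)

-- ===== LEMMAS AND PROOFS =====

-- the grouped dict's entry at v is exactly the set of keys whose value is v, in order
theorem getD_groups_fold (xs : List (List Int × Int)) (d : PySem.Dict Int (PySem.Set (List Int))) (v : Int) :
    (xs.foldl (fun d kv => d.modify kv.2 PySem.Set.empty (fun s => PySem.Set.add s kv.1)) d).getD v PySem.Set.empty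
      = ((xs.filter (fun kv => kv.2 == v)).map (·.1)).foldl PySem.Set.add (d.getD v PySem.Set.empty) := by
  induction xs generalizing d with
  | nil => simp
  | cons kv xs ih =>
      simp only [List.foldl_cons, ih, List.filter_cons]
      by_cases h : kv.2 = v
      · subst h
        simp [PySem.Dict.getD_modify_self]
      · rw [PySem.Dict.getD_modify]
        have hv : ¬ v = kv.2 := fun hh => h hh.symm
        simp [h, hv]

theorem getD_pvGroups (xs : List (List Int × Int)) (v : Int) :
    (pvGroups xs).getD v PySem.Set.empty
      = PySem.Set.ofList ((xs.filter (fun kv => kv.2 == v)).map (·.1)) := by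
  rw [pvGroups, getD_groups_fold]
  simp [PySem.Dict.getD_empty, PySem.Set.ofList_eq_foldl, PySem.Set.empty]

theorem keys_pvGroups (xs : List (List Int × Int)) :
    (pvGroups xs).keys = PySem.Set.ofList (xs.map (·.2)) := by
  rw [pvGroups, PySem.Dict.keys_foldl_modify_key (key := Prod.snd)]
  simp [PySem.Set.update_nil_left]

theorem nodup_keys_pvGroups (xs : List (List Int × Int)) : (pvGroups xs).keys.Nodup := by
  rw [keys_pvGroups]; exact PySem.Set.nodup_ofList _

-- ===== VERDICT (by name: the statement is the Claim_ definition above) =====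
theorem get_moved_bricks_spec : Claim_equal_get_moved_bricks := by
  intro s e _
  unfold Spec_get_moved_bricks get_moved_bricks get_moved_bricks_alt
  dsimp only
  rw [PySem.Dict.items_eq_map_keys (pvGroups s) (nodup_keys_pvGroups s) PySem.Set.empty,
      List.foldl_map, keys_pvGroups]
  apply PySem.List.foldl_congr_mem
  intro acc v _
  rw [getD_pvGroups s v, getD_pvGroups e v]
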